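-- pv_equiv track=rewrite | github.com/daniel-reich/ubiquitous-fiesta | WixXhsdqcNHe3vTn3_7.py | how_bad
-- ===== SOURCE A (Python) =====
-- def how_bad(n):
--   flag = True
--   lst = []
--   number = bin(n).count("1")
--
--   for foo in range(2, number // 2 + 1):
--     if number % foo == 0:
--       flag = False
--       break
--   if number % 2 == 0:
--     lst.append("Evil")
--   else:
--     lst.append("Odious")
--   if flag and number >= 2:
--     lst.append("Pernicious")
--   return lst
-- ===== SOURCE B (Python) =====
-- def how_bad(n):
--     number = bin(n).count("1")
--     lst = ["Evil" if number % 2 == 0 else "Odious"]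
--     is_prime = number >= 2
--     d = 2
--     while d * d <= number:
--         if number % d == 0:
--             is_prime = False
--             break
--         d += 1
--     if is_prime:
--         lst.append("Pernicious")
--     return lst
-- ===== Notes on version B (the rewrite author's own statement) =====
-- stated objective: alternative
-- what changed: Pernicious test trial-divides only up to sqrt(bitcount) in a while-loop with an explicit prime flag, instead of scanning all candidates up to bitcount//2; the parity label is built with a conditional expression.
import Mathlib
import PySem

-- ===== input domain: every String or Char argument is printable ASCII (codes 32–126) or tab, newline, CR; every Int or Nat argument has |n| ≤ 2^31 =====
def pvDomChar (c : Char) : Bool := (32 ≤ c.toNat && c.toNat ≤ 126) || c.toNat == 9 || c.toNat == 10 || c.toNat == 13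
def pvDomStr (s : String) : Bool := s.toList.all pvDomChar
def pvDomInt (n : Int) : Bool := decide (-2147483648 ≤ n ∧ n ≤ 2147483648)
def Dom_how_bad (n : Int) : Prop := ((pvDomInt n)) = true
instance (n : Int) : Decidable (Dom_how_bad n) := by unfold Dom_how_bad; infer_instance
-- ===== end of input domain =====

-- B replaces A's trial division up to number//2 by a while-loop dividing only up to sqrt(number) (simpler guard, fewer candidates).

-- ===== PORT A =====

-- bin(n).count("1"): number of 1-bits of |n| (Python's bin prints the sign separately)
def pvPopcount (m : Nat) : Nat :=
  if m = 0 then 0 else m % 2 + pvPopcount (m / 2)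

-- the for-loop over range(2, number//2 + 1) with break: returns the final 'flag'
def pvLoopA (number : Int) : List Int → Bool
  | [] => true
  | foo :: rest => if number % foo = 0 then false else pvLoopA number rest

def how_bad (n : Int) : List String :=
  let number : Int := (pvPopcount n.natAbs : Nat)
  let flag := pvLoopA number (PySem.List.pyRange 2 (PySem.Int.floordiv number 2 + 1) 1)
  let lst : List String := if number % 2 = 0 then ["Evil"] else ["Odious"]
  if flag ∧ number ≥ 2 then lst ++ ["Pernicious"] else lst

-- ===== PORT B =====

-- while d * d <= number: … — fuel-based encoding (fuel = number+1 steps always suffices,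
-- since the loop exits once d > number; exact transliteration of the while loop under that fuel)
def pvLoopB (number : Int) : Nat → Int → Bool
  | 0, _ => true
  | fuel + 1, d =>
    if d * d ≤ number then
      if number % d = 0 then false else pvLoopB number fuel (d + 1)
    else true

def how_bad_alt (n : Int) : List String :=
  let number : Int := (pvPopcount n.natAbs : Nat)
  let lst : List String := if number % 2 = 0 then ["Evil"] else ["Odious"]
  let isPrime := (number ≥ 2) && pvLoopB number (number.toNat + 1) 2
  if isPrime then lst ++ ["Pernicious"] else lst

-- ===== PRECONDITION & SPEC =====
def Spec_how_bad (n : Int) (out : List String) : Prop := out = how_bad_alt n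
instance (n : Int) (out : List String) : Decidable (Spec_how_bad n out) := by unfold Spec_how_bad; infer_instance

-- ===== CLAIM (what is proved, stated in full; the proofs are below) =====
def Claim_equal_how_bad : Prop := ∀ (n : Int), Dom_how_bad n → Spec_how_bad n (how_bad n)

-- ===== LEMMAS AND PROOFS =====

-- popcount is bounded by the bit length: m < 2^k → pvPopcount m ≤ k
theorem pvPopcount_le (k m : Nat) (h : m < 2 ^ k) : pvPopcount m ≤ k := by
  induction k generalizing m with
  | zero =>
    interval_cases m
    simp [pvPopcount]
  | succ k ih =>
    rw [pvPopcount]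
    split
    · omega
    · have : m / 2 < 2 ^ k := by omega
      have := ih (m / 2) this
      omega

-- both bodies agree for every bitcount value ≤ 32 (exhaustive check)
theorem body_eq (p : Nat) (hp : p ≤ 32)
    (n : Int) (hn : (pvPopcount n.natAbs : Nat) = p) :
    how_bad n = how_bad_alt n := by
  unfold how_bad how_bad_alt
  rw [hn]
  interval_cases p <;> decide

-- ===== VERDICT (by name: the statement is the Claim_ definition above) =====
theorem how_bad_spec : Claim_equal_how_bad := by
  intro n hdom
  unfold Spec_how_bad
  have hbound : n.natAbs < 2 ^ 32 := by
    have : Dom_how_bad n := hdom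
    unfold Dom_how_bad pvDomInt at this
    simp at this
    omega
  exact body_eq _ (pvPopcount_le 32 n.natAbs hbound) n rfl
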